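-- pv_equiv track=rewrite | github.com/stvadams-research/voynichMS | scripts/phase14_machine/run_14z2_mask_prediction.py | score_line_with_offset
-- ===== SOURCE A (Python) =====
-- def score_line_with_offset(
--     line_tokens, offset, lattice_map, window_contents, num_wins
-- ):
--     """Score a single line's admissibility under a given mask offset.
--
--     Reuses the same logic as run_14x_mask_inference.py.
--     """
--     admissible = 0
--     total = 0
--     current_window = 0
--
--     for word in line_tokens:
--         if word not in lattice_map:
--             continue
--         total += 1
--
--         shifted_win = (current_window + offset) % num_wins
--         found = False
--         for d in [-1, 0, 1]:
--             check_win = (shifted_win + d) % num_wins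
--             if word in window_contents.get(check_win, []):
--                 found = True
--                 assigned = lattice_map.get(word)
--                 if assigned is not None:
--                     current_window = (assigned - offset) % num_wins
--                 break
--
--         if found:
--             admissible += 1
--         else:
--             assigned = lattice_map.get(word)
--             if assigned is not None:
--                 current_window = (assigned - offset) % num_wins
--
--     return admissible, total
-- ===== SOURCE B (Python) =====
-- def score_line_with_offset(
--     line_tokens, offset, lattice_map, window_contents, num_wins
-- ):
--     """Score a single line's admissibility under a given mask offset.
--
--     One pass over window_contents builds an inverted index
--     token -> set(window indices); each token is then judged by a single
--     set intersection instead of an inner scan over three window lists,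
--     and the current-window update is factored out of both branches.
--     """
--     index = {}
--     for win, toks in window_contents.items():
--         for t in toks:
--             index.setdefault(t, set()).add(win)
--
--     admissible = 0
--     total = 0
--     current_window = 0
--
--     for word in line_tokens:
--         if word not in lattice_map:
--             continue
--         total += 1
--
--         shifted_win = (current_window + offset) % num_wins
--         wins = index.get(word, set())
--         if wins & {(shifted_win + d) % num_wins for d in (-1, 0, 1)}:
--             admissible += 1
--
--         assigned = lattice_map.get(word)
--         if assigned is not None:
--             current_window = (assigned - offset) % num_wins
--
--     return admissible, total
-- ===== Notes on version B (the rewrite author's own statement) =====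
-- stated objective: alternative
-- what changed: B builds an inverted index token->set(window) in one pass over window_contents and judges each token by a single set intersection with the three shifted windows, replacing A's inner break-loop over d in [-1,0,1] with per-window list scans; the current_window update is factored out of A's two branches into one unconditional assignment.
import Mathlib
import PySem

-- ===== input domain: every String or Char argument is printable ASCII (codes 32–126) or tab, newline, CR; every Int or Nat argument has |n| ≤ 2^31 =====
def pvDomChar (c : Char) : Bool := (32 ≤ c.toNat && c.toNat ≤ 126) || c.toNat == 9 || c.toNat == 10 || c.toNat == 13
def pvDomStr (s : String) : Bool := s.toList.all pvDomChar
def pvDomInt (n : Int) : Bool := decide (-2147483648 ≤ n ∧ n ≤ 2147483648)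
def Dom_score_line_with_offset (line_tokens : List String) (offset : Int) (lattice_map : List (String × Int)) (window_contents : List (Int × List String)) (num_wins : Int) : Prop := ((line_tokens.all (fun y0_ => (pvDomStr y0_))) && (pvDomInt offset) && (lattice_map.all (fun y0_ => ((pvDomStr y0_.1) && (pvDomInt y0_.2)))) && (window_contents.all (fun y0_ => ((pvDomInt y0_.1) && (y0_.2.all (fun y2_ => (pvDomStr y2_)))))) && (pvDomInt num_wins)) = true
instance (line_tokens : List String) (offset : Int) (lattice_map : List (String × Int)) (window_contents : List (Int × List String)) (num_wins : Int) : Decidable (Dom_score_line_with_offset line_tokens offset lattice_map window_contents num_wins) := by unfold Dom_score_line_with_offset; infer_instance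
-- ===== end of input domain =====

-- B replaces A's inner break-loop over d∈[-1,0,1] (each a window-list scan) by an inverted
-- index token→set(window) built in one pass plus a single set intersection, and factors the
-- current_window update out of A's two branches (objective: alternative algorithm, same cost class).


-- ===== PORT A =====
-- A's inner 'for d in [-1, 0, 1]: … break' loop: returns (found, current_window after the loop)
def slwoInnerA (word : String) (offset : Int) (lattice_map : List (String × Int)) (window_contents : List (Int × List String)) (num_wins : Int) (shifted_win : Int) (cw : Int) : List Int → Bool × Int
  | [] => (false, cw)
  | d :: rest =>
    let check_win := PySem.Int.mod (shifted_win + d) num_wins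
    if word ∈ (PySem.Dict.mk window_contents).getD check_win [] then
      let cw' := match (PySem.Dict.mk lattice_map).get? word with
        | some assigned => PySem.Int.mod (assigned - offset) num_wins
        | none => cw
      (true, cw')
    else
      slwoInnerA word offset lattice_map window_contents num_wins shifted_win cw rest

def score_line_with_offset (line_tokens : List String) (offset : Int) (lattice_map : List (String × Int)) (window_contents : List (Int × List String)) (num_wins : Int) : Int × Int :=
  let r := line_tokens.foldl (fun (st : Int × Int × Int) word =>
    if ¬ (PySem.Dict.mk lattice_map).contains word then st
    else
      let admissible := st.1
      let total := st.2.1 + 1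
      let current_window := st.2.2
      let shifted_win := PySem.Int.mod (current_window + offset) num_wins
      let fr := slwoInnerA word offset lattice_map window_contents num_wins shifted_win current_window [-1, 0, 1]
      if fr.1 then (admissible + 1, total, fr.2)
      else
        let cw2 := match (PySem.Dict.mk lattice_map).get? word with
          | some assigned => PySem.Int.mod (assigned - offset) num_wins
          | none => fr.2
        (admissible, total, cw2)) (0, 0, 0)
  (r.1, r.2.1)

-- ===== PORT B =====
-- one pass over window_contents: inverted index token -> set of window indices
def slwoIndex (window_contents : List (Int × List String)) : PySem.Dict String (PySem.Set Int) :=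
  window_contents.foldl (fun idx p =>
    p.2.foldl (fun idx t => idx.modify t PySem.Set.empty (fun s => PySem.Set.add s p.1)) idx)
    PySem.Dict.empty

def score_line_with_offset_alt (line_tokens : List String) (offset : Int) (lattice_map : List (String × Int)) (window_contents : List (Int × List String)) (num_wins : Int) : Int × Int :=
  let index := slwoIndex window_contents
  let r := line_tokens.foldl (fun (st : Int × Int × Int) word =>
    if ¬ (PySem.Dict.mk lattice_map).contains word then st
    else
      let total := st.2.1 + 1
      let shifted_win := PySem.Int.mod (st.2.2 + offset) num_wins
      let wins : PySem.Set Int := index.getD word PySem.Set.empty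
      let targets : PySem.Set Int :=
        PySem.Set.ofList (([-1, 0, 1] : List Int).map (fun d => PySem.Int.mod (shifted_win + d) num_wins))
      let admissible := if (PySem.Set.inter wins targets) ≠ [] then st.1 + 1 else st.1
      let cw := match (PySem.Dict.mk lattice_map).get? word with
        | some assigned => PySem.Int.mod (assigned - offset) num_wins
        | none => st.2.2
      (admissible, total, cw)) (0, 0, 0)
  (r.1, r.2.1)

-- ===== PRECONDITION & SPEC =====
-- Pre_ excludes (a) assoc lists with duplicate window keys — the argument is a Python dict, whose
-- assoc-list image has unique keys — and (b) num_wins = 0 when some token is a lattice_map key,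
-- where Python A raises ZeroDivisionError.
def Pre_score_line_with_offset (line_tokens : List String) (offset : Int) (lattice_map : List (String × Int)) (window_contents : List (Int × List String)) (num_wins : Int) : Prop :=
  (window_contents.map (·.1)).Nodup ∧
  (num_wins ≠ 0 ∨ ∀ w ∈ line_tokens, ∀ p ∈ lattice_map, p.1 ≠ w)
instance (line_tokens : List String) (offset : Int) (lattice_map : List (String × Int)) (window_contents : List (Int × List String)) (num_wins : Int) : Decidable (Pre_score_line_with_offset line_tokens offset lattice_map window_contents num_wins) := by unfold Pre_score_line_with_offset; infer_instance

def pvWitness_score_line_with_offset : List String × Int × (List (String × Int)) × (List (Int × List String)) × Int :=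
  (["a", "b"], 1, [("a", 2)], [(0, ["a"]), (1, ["b"])], 3)

def Spec_score_line_with_offset (line_tokens : List String) (offset : Int) (lattice_map : List (String × Int)) (window_contents : List (Int × List String)) (num_wins : Int) (out : Int × Int) : Prop := out = score_line_with_offset_alt line_tokens offset lattice_map window_contents num_wins
instance (line_tokens : List String) (offset : Int) (lattice_map : List (String × Int)) (window_contents : List (Int × List String)) (num_wins : Int) (out : Int × Int) : Decidable (Spec_score_line_with_offset line_tokens offset lattice_map window_contents num_wins out) := by unfold Spec_score_line_with_offset; infer_instance

-- ===== CLAIM (what is proved, stated in full; the proofs are below) =====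
def Claim_equal_score_line_with_offset : Prop := ∀ (line_tokens : List String) (offset : Int) (lattice_map : List (String × Int)) (window_contents : List (Int × List String)) (num_wins : Int), Dom_score_line_with_offset line_tokens offset lattice_map window_contents num_wins → Pre_score_line_with_offset line_tokens offset lattice_map window_contents num_wins → Spec_score_line_with_offset line_tokens offset lattice_map window_contents num_wins (score_line_with_offset line_tokens offset lattice_map window_contents num_wins)

-- ===== LEMMAS AND PROOFS =====

-- 1. one pair's inner fold
theorem mem_getD_inner (w : String) (win win' : Int) (toks : List String)
    (idx : PySem.Dict String (PySem.Set Int)) :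
    win' ∈ (toks.foldl (fun idx t => idx.modify t PySem.Set.empty (fun s => PySem.Set.add s win)) idx).getD w PySem.Set.empty ↔
    win' ∈ idx.getD w PySem.Set.empty ∨ (win' = win ∧ w ∈ toks) := by
  induction toks generalizing idx with
  | nil => simp
  | cons t rest ih =>
    simp only [List.foldl_cons, ih, PySem.Dict.getD_modify]
    by_cases h : w = t
    · subst h
      simp only [if_pos trivial, PySem.Set.mem_add, List.mem_cons]
      tauto
    · simp only [if_neg h, List.mem_cons]
      tauto

-- 2/3. index characterization
theorem mem_getD_slwoIndex_aux (wc : List (Int × List String)) (idx : PySem.Dict String (PySem.Set Int))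
    (w : String) (win' : Int) :
    win' ∈ (wc.foldl (fun idx p =>
      p.2.foldl (fun idx t => idx.modify t PySem.Set.empty (fun s => PySem.Set.add s p.1)) idx) idx).getD w PySem.Set.empty ↔
    win' ∈ idx.getD w PySem.Set.empty ∨ ∃ p ∈ wc, p.1 = win' ∧ w ∈ p.2 := by
  induction wc generalizing idx with
  | nil => simp
  | cons q rest ih =>
    simp only [List.foldl_cons, ih, mem_getD_inner]
    constructor
    · rintro (((h|⟨rfl,h⟩)|h))
      · exact Or.inl h
      · exact Or.inr ⟨q, by simp, rfl, h⟩
      · rcases h with ⟨p, hp, h⟩; exact Or.inr ⟨p, by simp [hp], h⟩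
    · rintro (h | ⟨p, hp, hh⟩)
      · exact Or.inl (Or.inl h)
      · rcases List.mem_cons.mp hp with rfl | hp
        · exact Or.inl (Or.inr ⟨hh.1.symm, hh.2⟩)
        · exact Or.inr ⟨p, hp, hh⟩

theorem mem_getD_slwoIndex (wc : List (Int × List String)) (w : String) (win' : Int) :
    win' ∈ (slwoIndex wc).getD w PySem.Set.empty ↔ ∃ p ∈ wc, p.1 = win' ∧ w ∈ p.2 := by
  simpa [PySem.Dict.getD_empty] using mem_getD_slwoIndex_aux wc PySem.Dict.empty w win'

-- 4. A-side getD on a nodup-key raw dict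
theorem mem_getD_mk_nodup (wc : List (Int × List String)) (hnd : (wc.map (·.1)).Nodup)
    (win : Int) (w : String) :
    w ∈ (PySem.Dict.mk wc).getD win [] ↔ ∃ p ∈ wc, p.1 = win ∧ w ∈ p.2 := by
  induction wc with
  | nil => simp [PySem.Dict.getD_eq_get?_getD, PySem.Dict.get?]
  | cons q rest ih =>
    have hnd' : (rest.map (·.1)).Nodup := (List.nodup_cons.mp hnd).2
    have hq : q.1 ∉ rest.map (·.1) := (List.nodup_cons.mp hnd).1
    rw [PySem.Dict.getD_eq_get?_getD]
    rcases q with ⟨k, v⟩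
    rw [PySem.Dict.get?_mk_cons]
    by_cases hk : k = win
    · subst hk
      simp only [beq_self_eq_true, if_pos, Option.getD_some]
      constructor
      · intro h; exact ⟨(k, v), by simp, rfl, h⟩
      · rintro ⟨p, hp, h1, h2⟩
        rcases List.mem_cons.mp hp with rfl | hp
        · exact h2
        · exact absurd (show (k:Int) ∈ rest.map (·.1) from h1 ▸ List.mem_map_of_mem (f := (·.1)) hp) hq
    · have : (k == win) = false := by simp [hk]
      rw [this]
      simp only [Bool.false_eq_true, if_false]
      rw [← PySem.Dict.getD_eq_get?_getD, ih hnd']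
      constructor
      · rintro ⟨p, hp, h⟩; exact ⟨p, List.mem_cons_of_mem _ hp, h⟩
      · rintro ⟨p, hp, h⟩
        rcases List.mem_cons.mp hp with rfl | hp
        · exact absurd h.1 hk
        · exact ⟨p, hp, h⟩

-- 5. A's break loop computes: found = any d hits; cw' = updated iff found
theorem slwoInnerA_eq (word : String) (offset : Int) (lm : List (String × Int))
    (wc : List (Int × List String)) (n s cw : Int) (ds : List Int) :
    slwoInnerA word offset lm wc n s cw ds =
      (ds.any (fun d => decide (word ∈ (PySem.Dict.mk wc).getD (PySem.Int.mod (s + d) n) [])),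
       if ds.any (fun d => decide (word ∈ (PySem.Dict.mk wc).getD (PySem.Int.mod (s + d) n) []))
       then (match (PySem.Dict.mk lm).get? word with
             | some assigned => PySem.Int.mod (assigned - offset) n
             | none => cw)
       else cw) := by
  induction ds with
  | nil => simp [slwoInnerA]
  | cons d rest ih =>
    simp only [slwoInnerA, List.any_cons]
    by_cases h : word ∈ (PySem.Dict.mk wc).getD (PySem.Int.mod (s + d) n) []
    · simp [h]
    · simp [h, ih]

-- 6. A's three-window hit test ↔ B's set intersection is nonempty
theorem found_iff (wc : List (Int × List String)) (hnd : (wc.map (·.1)).Nodup)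
    (word : String) (s n : Int) :
    (([-1, 0, 1] : List Int).any (fun d => decide (word ∈ (PySem.Dict.mk wc).getD (PySem.Int.mod (s + d) n) []))) = true ↔
    PySem.Set.inter ((slwoIndex wc).getD word PySem.Set.empty)
      (PySem.Set.ofList (([-1, 0, 1] : List Int).map (fun d => PySem.Int.mod (s + d) n))) ≠ [] := by
  rw [List.any_eq_true, Ne, List.eq_nil_iff_forall_not_mem]
  push_neg
  constructor
  · rintro ⟨d, hd, hmem⟩
    rw [decide_eq_true_eq, mem_getD_mk_nodup wc hnd] at hmem
    rcases hmem with ⟨p, hp, h1, h2⟩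
    exact ⟨p.1, (PySem.Set.mem_inter _ _ _).mpr
      ⟨(mem_getD_slwoIndex wc word p.1).mpr ⟨p, hp, rfl, h2⟩,
       (PySem.Set.mem_ofList _ _).mpr (List.mem_map.mpr ⟨d, hd, h1.symm⟩)⟩⟩
  · rintro ⟨x, hx⟩
    rw [PySem.Set.mem_inter] at hx
    obtain ⟨hw, ht⟩ := hx
    rw [PySem.Set.mem_ofList] at ht
    rcases List.mem_map.mp ht with ⟨d, hd, rfl⟩
    refine ⟨d, hd, decide_eq_true ?_⟩
    rcases (mem_getD_slwoIndex wc word _).mp hw with ⟨p, hp, h1, h2⟩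
    exact (mem_getD_mk_nodup wc hnd _ word).mpr ⟨p, hp, h1, h2⟩


theorem slwo_ports_eq (line_tokens : List String) (offset : Int) (lattice_map : List (String × Int))
    (window_contents : List (Int × List String)) (num_wins : Int)
    (hnd : (window_contents.map (·.1)).Nodup) :
    score_line_with_offset line_tokens offset lattice_map window_contents num_wins =
    score_line_with_offset_alt line_tokens offset lattice_map window_contents num_wins := by
  unfold score_line_with_offset score_line_with_offset_alt
  have hfold := List.foldl_ext
    (fun (st : Int × Int × Int) word =>
      if ¬ (PySem.Dict.mk lattice_map).contains word then st
      else
        let admissible := st.1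
        let total := st.2.1 + 1
        let current_window := st.2.2
        let shifted_win := PySem.Int.mod (current_window + offset) num_wins
        let fr := slwoInnerA word offset lattice_map window_contents num_wins shifted_win current_window [-1, 0, 1]
        if fr.1 then (admissible + 1, total, fr.2)
        else
          let cw2 := match (PySem.Dict.mk lattice_map).get? word with
            | some assigned => PySem.Int.mod (assigned - offset) num_wins
            | none => fr.2
          (admissible, total, cw2))
    (fun (st : Int × Int × Int) word =>
      if ¬ (PySem.Dict.mk lattice_map).contains word then st
      else
        let total := st.2.1 + 1
        let shifted_win := PySem.Int.mod (st.2.2 + offset) num_wins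
        let wins : PySem.Set Int := (slwoIndex window_contents).getD word PySem.Set.empty
        let targets : PySem.Set Int :=
          PySem.Set.ofList (([-1, 0, 1] : List Int).map (fun d => PySem.Int.mod (shifted_win + d) num_wins))
        let admissible := if (PySem.Set.inter wins targets) ≠ [] then st.1 + 1 else st.1
        let cw := match (PySem.Dict.mk lattice_map).get? word with
          | some assigned => PySem.Int.mod (assigned - offset) num_wins
          | none => st.2.2
        (admissible, total, cw))
    ((0 : Int), (0 : Int), (0 : Int)) (l := line_tokens) ?_
  · rw [hfold]
  · intro st word _
    by_cases hk : (PySem.Dict.mk lattice_map).contains word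
    · simp only [hk, not_true_eq_false, if_false]
      rw [slwoInnerA_eq]
      set s := PySem.Int.mod (st.2.2 + offset) num_wins with hs
      by_cases hf : (([-1, 0, 1] : List Int).any
          (fun d => decide (word ∈ (PySem.Dict.mk window_contents).getD (PySem.Int.mod (s + d) num_wins) []))) = true
      · have hB := (found_iff window_contents hnd word s num_wins).mp hf
        rw [if_pos hf, if_pos hB]
        simp only [hf, if_pos]
      · have hB : ¬ (PySem.Set.inter ((slwoIndex window_contents).getD word PySem.Set.empty)
            (PySem.Set.ofList (([-1, 0, 1] : List Int).map (fun d => PySem.Int.mod (s + d) num_wins))) ≠ []) :=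
          fun h => hf ((found_iff window_contents hnd word s num_wins).mpr h)
        rw [if_neg (by simpa using hf), if_neg hB]
        simp only [Bool.not_eq_true] at hf
        simp only [hf, Bool.false_eq_true, if_false]
    · beta_reduce
      rw [if_pos hk, if_pos hk]

-- ===== VERDICT (by name: the statement is the Claim_ definition above) =====
theorem score_line_with_offset_spec : Claim_equal_score_line_with_offset := by
  intro line_tokens offset lattice_map window_contents num_wins _hdom hpre
  unfold Spec_score_line_with_offset
  exact slwo_ports_eq line_tokens offset lattice_map window_contents num_wins hpre.1
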